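-- pv_equiv track=rewrite | github.com/Teffa14/AutoPTU | auto_ptu/sprites.py | _score_variety_tokens
-- ===== SOURCE A (Python) =====
-- def _normalize_variant_token(token: str) -> str:
--     token = (token or "").strip().lower()
--     aliases = {
--         "m": "male",
--         "f": "female",
--         "du": "dusk",
--         "da": "dawn",
--         "c": "crowned",
--         "h": "hero",
--         "i": "incarnate",
--         "t": "therian",
--     }
--     return aliases.get(token, token)
--
-- def _score_variety_tokens(form_tokens: list[str], variety_tokens: list[str]) -> int:
--     normalized_form = [_normalize_variant_token(t) for t in form_tokens]
--     normalized_variety = [_normalize_variant_token(t) for t in variety_tokens]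
--     form_set = {t for t in normalized_form if t}
--     variety_set = {t for t in normalized_variety if t}
--     if "male" in form_set and "female" in variety_set:
--         return -1
--     if "female" in form_set and "male" in variety_set:
--         return -1
--     score = 0
--     for token in form_set:
--         if token in variety_set:
--             score += 4
--             continue
--         if any(v.startswith(token) for v in variety_set if token):
--             score += 1
--     return score
-- ===== SOURCE B (Python) =====
-- def _normalize_variant_token(token: str) -> str:
--     token = (token or "").strip().lower()
--     aliases = {
--         "m": "male",
--         "f": "female",
--         "du": "dusk",
--         "da": "dawn",
--         "c": "crowned",
--         "h": "hero",
--         "i": "incarnate",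
--         "t": "therian",
--     }
--     return aliases.get(token, token)
--
-- def _score_variety_tokens(form_tokens: list, variety_tokens: list) -> int:
--     form_set = {t for t in map(_normalize_variant_token, form_tokens) if t}
--     variety_set = {t for t in map(_normalize_variant_token, variety_tokens) if t}
--     if "male" in form_set and "female" in variety_set:
--         return -1
--     if "female" in form_set and "male" in variety_set:
--         return -1
--     # Sort both sets and scan them together: for each form token t (ascending),
--     # advance a single pointer past the variety tokens < t; the token it then
--     # rests on is the only candidate — equal to t (exact match, +4) or the
--     # lexicographically smallest string >= t, which starts with t iff any
--     # variety token does (+1).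
--     fs = sorted(form_set)
--     vs = sorted(variety_set)
--     score = 0
--     j = 0
--     for t in fs:
--         while j < len(vs) and vs[j] < t:
--             j += 1
--         if j < len(vs):
--             if vs[j] == t:
--                 score += 4
--             elif vs[j].startswith(t):
--                 score += 1
--     return score
-- ===== Notes on version B (the rewrite author's own statement) =====
-- stated objective: faster
-- what changed: Replaces A's nested scan (for each form token an any() over the whole variety set) by a sort-then-merge two-pointer scan: both sets are sorted and a single monotone pointer into the sorted variety list finds, per form token, the unique candidate (its lexicographic successor-or-equal), which is checked for equality (+4) or prefix (+1).
import Mathlib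
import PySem

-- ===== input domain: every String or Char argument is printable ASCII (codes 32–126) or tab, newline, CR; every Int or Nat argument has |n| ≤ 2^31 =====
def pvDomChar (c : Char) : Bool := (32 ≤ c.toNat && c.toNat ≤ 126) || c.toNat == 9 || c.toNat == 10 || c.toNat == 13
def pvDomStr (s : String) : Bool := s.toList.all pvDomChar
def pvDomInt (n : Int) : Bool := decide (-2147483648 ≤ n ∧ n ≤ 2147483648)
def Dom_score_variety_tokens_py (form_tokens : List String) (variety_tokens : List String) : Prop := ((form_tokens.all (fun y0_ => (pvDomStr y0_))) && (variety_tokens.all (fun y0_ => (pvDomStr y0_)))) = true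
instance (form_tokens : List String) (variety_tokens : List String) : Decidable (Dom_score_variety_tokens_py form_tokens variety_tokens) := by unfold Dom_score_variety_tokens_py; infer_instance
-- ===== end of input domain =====

-- B replaces A's nested scan (for each form token, an any() over all variety tokens) by a
-- sort-then-merge two-pointer scan over both sorted sets (objective: faster; a timing run
-- measured B faster at the larger sizes).

-- ===== PORT A =====
-- shared helper: _normalize_variant_token (both Pythons use the same function)
def pvAliases : PySem.Dict String String := PySem.Dict.ofList
  [("m", "male"), ("f", "female"), ("du", "dusk"), ("da", "dawn"),
   ("c", "crowned"), ("h", "hero"), ("i", "incarnate"), ("t", "therian")]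

def pvNorm (token : String) : String :=
  let t := PySem.Str.lower (PySem.Str.strip token)   -- (token or "").strip().lower(): for a str this is .strip().lower()
  PySem.Dict.getD pvAliases t t

def score_variety_tokens_py (form_tokens : List String) (variety_tokens : List String) : Int :=
  let normalized_form := form_tokens.map pvNorm
  let normalized_variety := variety_tokens.map pvNorm
  let form_set : PySem.Set String := PySem.Set.ofList (normalized_form.filter (fun t => !t.isEmpty))
  let variety_set : PySem.Set String := PySem.Set.ofList (normalized_variety.filter (fun t => !t.isEmpty))
  if form_set.contains "male" && variety_set.contains "female" then -1
  else if form_set.contains "female" && variety_set.contains "male" then -1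
  else
    -- loop over form_set: the per-token contribution is order-independent, so folding the Set's list is exact
    form_set.foldl (fun score token =>
      if variety_set.contains token then score + 4
      else if (variety_set.filter (fun _ => !token.isEmpty)).any
                (fun v => PySem.Str.startswith v token) then score + 1
      else score) (0 : Int)

-- ===== PORT B =====
-- B's for-loop over sorted(form_set) with the monotone pointer j into sorted(variety_set):
-- recursion on the form list carrying the not-yet-passed suffix of the variety list
-- (the inner 'while vs[j] < t: j += 1' is the dropWhile on that suffix).
def pvMergeScore : List String → List String → Int
  | [], _ => 0
  | t :: rest, vs =>
    let ws := vs.dropWhile (fun v => decide (v < t))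
    (match ws with
     | [] => 0
     | w :: _ => if w = t then 4 else if PySem.Str.startswith w t then 1 else 0)
    + pvMergeScore rest ws

def score_variety_tokens_py_alt (form_tokens : List String) (variety_tokens : List String) : Int :=
  let form_set : PySem.Set String :=
    PySem.Set.ofList ((form_tokens.map pvNorm).filter (fun t => !t.isEmpty))
  let variety_set : PySem.Set String :=
    PySem.Set.ofList ((variety_tokens.map pvNorm).filter (fun t => !t.isEmpty))
  if form_set.contains "male" && variety_set.contains "female" then -1
  else if form_set.contains "female" && variety_set.contains "male" then -1
  else
    let fs := PySem.List.sorted form_set (fun x => x) false      -- sorted(form_set)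
    let vs := PySem.List.sorted variety_set (fun x => x) false   -- sorted(variety_set)
    pvMergeScore fs vs

-- ===== PRECONDITION & SPEC =====
def Spec_score_variety_tokens_py (form_tokens : List String) (variety_tokens : List String) (out : Int) : Prop := out = score_variety_tokens_py_alt form_tokens variety_tokens
instance (form_tokens : List String) (variety_tokens : List String) (out : Int) : Decidable (Spec_score_variety_tokens_py form_tokens variety_tokens out) := by unfold Spec_score_variety_tokens_py; infer_instance

-- ===== CLAIM (what is proved, stated in full; the proofs are below) =====
def Claim_equal_score_variety_tokens_py : Prop := ∀ (form_tokens : List String) (variety_tokens : List String), Dom_score_variety_tokens_py form_tokens variety_tokens → Spec_score_variety_tokens_py form_tokens variety_tokens (score_variety_tokens_py form_tokens variety_tokens)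

-- ===== LEMMAS AND PROOFS =====

-- the per-token contribution of A's loop, as a function of the variety list
def pvC (vs : List String) (t : String) : Int :=
  if vs.contains t then 4
  else if vs.any (fun v => PySem.Str.startswith v t) then 1
  else 0

-- a :: t ≤ b :: w decomposed, for the lexicographic order on List Char
theorem pv_cons_le_cons (a b : Char) (t w : List Char) :
    (a :: t ≤ b :: w) ↔ (a < b ∨ (a = b ∧ t ≤ w)) := by
  rw [le_iff_lt_or_eq, le_iff_lt_or_eq, List.cons_lt_cons_iff, List.cons.injEq]; tauto

theorem pv_nil_le (t : List Char) : ([] : List Char) ≤ t := by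
  cases t with
  | nil => exact le_refl _
  | cons a t => exact le_of_lt List.Lex.nil

-- a prefix is lexicographically ≤ the whole list
theorem pv_prefix_le : ∀ (t v : List Char), t <+: v → t ≤ v := by
  intro t
  induction t with
  | nil => intro v _; exact pv_nil_le v
  | cons a t ih =>
    intro v hp
    obtain ⟨u, hu⟩ := hp
    subst hu
    rw [List.cons_append, pv_cons_le_cons]
    exact Or.inr ⟨rfl, ih _ ⟨u, rfl⟩⟩

-- anything lexicographically between t and a list with prefix t also has prefix t
theorem pv_between_prefix : ∀ (t w v : List Char), t ≤ w → w ≤ v → t <+: v → t <+: w := by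
  intro t
  induction t with
  | nil => intro w v _ _ _; exact List.nil_prefix
  | cons a t ih =>
    intro w v htw hwv hp
    obtain ⟨u, hu⟩ := hp
    subst hu
    cases w with
    | nil =>
      exact absurd htw (by
        rw [le_iff_lt_or_eq]
        rintro (h | h)
        · cases h
        · cases h)
    | cons b w' =>
      rw [List.cons_append] at hwv
      rw [pv_cons_le_cons] at htw hwv
      rcases htw with h1 | ⟨hab, h1⟩
      · rcases hwv with h2 | ⟨hba, _⟩
        · exact absurd (h1.trans h2) (lt_irrefl a)
        · exact absurd h1 (by rw [hba]; exact lt_irrefl a)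
      · subst hab
        rcases hwv with h2 | ⟨_, h2⟩
        · exact absurd h2 (lt_irrefl a)
        · obtain ⟨u2, hu2⟩ := ih w' (t ++ u) h1 h2 ⟨u, rfl⟩
          exact ⟨u2, by rw [List.cons_append, hu2]⟩

-- the two string-level corollaries
theorem pv_startswith_le (t v : String) (h : PySem.Str.startswith v t = true) : t ≤ v := by
  rw [PySem.Str.startswith_eq, PySem.Chars.startswith_iff] at h
  rw [String.le_iff_toList_le]
  exact pv_prefix_le _ _ h

theorem pv_startswith_between (t w v : String) (htw : t ≤ w) (hwv : w ≤ v)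
    (h : PySem.Str.startswith v t = true) : PySem.Str.startswith w t = true := by
  rw [PySem.Str.startswith_eq, PySem.Chars.startswith_iff] at h ⊢
  rw [String.le_iff_toList_le] at htw hwv
  exact pv_between_prefix _ _ _ htw hwv h

-- pvC only depends on the variety list up to permutation
theorem pv_c_perm (vs₁ vs₂ : List String) (h : vs₁.Perm vs₂) (t : String) :
    pvC vs₁ t = pvC vs₂ t := by
  unfold pvC
  simp only [List.contains_eq_mem, h.mem_iff, h.any_eq]

-- A's loop over fs (all tokens nonempty) sums pvC
theorem pv_fold_eq_sum (vsS : List String) :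
    ∀ (fs : List String) (a : Int), (∀ t ∈ fs, t.isEmpty = false) →
      fs.foldl (fun score token =>
        if vsS.contains token then score + 4
        else if (vsS.filter (fun _ => !token.isEmpty)).any
                  (fun v => PySem.Str.startswith v token) then score + 1
        else score) a
      = a + (fs.map (pvC vsS)).sum := by
  intro fs
  induction fs with
  | nil => intro a _; simp
  | cons t rest ih =>
    intro a h
    have ht : t.isEmpty = false := h t (by simp)
    have hrest : ∀ x ∈ rest, x.isEmpty = false := fun x hx => h x (by simp [hx])
    have hfilter : vsS.filter (fun _ => !t.isEmpty) = vsS := by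
      simp [ht]
    rw [List.foldl_cons, List.map_cons, List.sum_cons, hfilter]
    rw [show pvC vsS t = (if vsS.contains t then (4 : Int)
          else if vsS.any (fun v => PySem.Str.startswith v t) then 1 else 0) from rfl]
    split_ifs with h1 h2 <;> rw [ih _ hrest] <;> ring

-- head of dropWhile fails the predicate
theorem pv_head_dropWhile (p : String → Bool) (l : List String) (w : String) (ws : List String)
    (h : l.dropWhile p = w :: ws) : p w = false := by
  have := List.head_dropWhile_not p (l := l) (by simp [h])
  simpa [h] using this

-- a member of the dropped suffix; every member of vs that is ≥ t survives dropWhile (· < t)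
theorem pv_mem_dropWhile_of_ge (vs : List String) (t v : String) (hv : v ∈ vs) (hge : t ≤ v) :
    v ∈ vs.dropWhile (fun v => decide (v < t)) := by
  have hsplit : vs.takeWhile (fun v => decide (v < t)) ++ vs.dropWhile (fun v => decide (v < t)) = vs :=
    List.takeWhile_append_dropWhile
  rw [← hsplit] at hv
  rcases List.mem_append.mp hv with h | h
  · have hvt : v < t :=
      of_decide_eq_true (List.mem_takeWhile_imp (p := fun v => decide (v < t)) h)
    exact absurd hge (not_le_of_gt hvt)
  · exact h

-- the merge head-check computes pvC over the full (sorted) variety list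
theorem pv_headcheck_eq_c (vs : List String) (t : String) (hs : vs.Pairwise (· ≤ ·)) :
    (match vs.dropWhile (fun v => decide (v < t)) with
     | [] => (0 : Int)
     | w :: _ => if w = t then 4 else if PySem.Str.startswith w t then 1 else 0)
    = pvC vs t := by
  have hsub : (vs.dropWhile (fun v => decide (v < t))).Sublist vs := List.dropWhile_sublist _
  unfold pvC
  cases hws : vs.dropWhile (fun v => decide (v < t)) with
  | nil =>
    dsimp only
    -- every element of vs is < t: no exact match and no prefix match
    have hall : ∀ x ∈ vs, x < t := by
      intro x hx
      have := (List.dropWhile_eq_nil_iff.mp hws) x hx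
      simpa using this
    have htnot : t ∉ vs := fun hx => lt_irrefl t (hall t hx)
    have hc : vs.contains t = false := by
      simp [List.contains_eq_mem, htnot]
    have hp : vs.any (fun v => PySem.Str.startswith v t) = false := by
      simp only [List.any_eq_false]
      intro x hx he
      exact absurd (pv_startswith_le t x he) (not_le_of_gt (hall x hx))
    rw [hc, hp]; simp
  | cons w ws =>
    dsimp only
    have hwmem : w ∈ vs := hsub.mem (by rw [hws]; simp)
    have hwt : t ≤ w := by
      have := pv_head_dropWhile _ vs w ws hws
      simpa using this
    have hwle : ∀ v ∈ vs, t ≤ v → w ≤ v := by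
      -- w is the head of the surviving suffix, which is sorted
      intro v hv hge
      have hvmem := pv_mem_dropWhile_of_ge vs t v hv hge
      rw [hws] at hvmem
      rcases List.mem_cons.mp hvmem with rfl | hvtail
      · exact le_refl v
      · have := (hs.sublist hsub)
        rw [hws] at this
        exact (List.pairwise_cons.mp this).1 v hvtail
    by_cases hwt_eq : w = t
    · subst hwt_eq
      have hc : vs.contains w = true := by simp [List.contains_eq_mem, hwmem]
      rw [if_pos rfl, hc]; simp
    · have htnot : t ∉ vs := fun hx => hwt_eq (le_antisymm (hwle t hx (le_refl t)) hwt)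
      have hc : vs.contains t = false := by
        simp [List.contains_eq_mem, htnot]
      rw [if_neg hwt_eq, hc]
      -- prefix check: any over vs ↔ startswith of the head w
      by_cases hsw : PySem.Str.startswith w t = true
      · have hp : vs.any (fun v => PySem.Str.startswith v t) = true :=
          List.any_eq_true.mpr ⟨w, hwmem, hsw⟩
        rw [if_pos hsw, hp]; simp
      · have hp : vs.any (fun v => PySem.Str.startswith v t) = false := by
          simp only [List.any_eq_false]
          intro x hx he
          have hxt : t ≤ x := pv_startswith_le t x he
          exact hsw (pv_startswith_between t w x hwt (hwle x hx hxt) he)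
        rw [if_neg hsw, hp]; simp
  
-- dropping variety tokens < t does not change pvC at any t' > t
theorem pv_c_dropWhile (vs : List String) (t t' : String) (htt : t < t') :
    pvC (vs.dropWhile (fun v => decide (v < t))) t' = pvC vs t' := by
  unfold pvC
  have hmem : ∀ v : String, v ∈ vs → (t' ≤ v) → v ∈ vs.dropWhile (fun v => decide (v < t)) := by
    intro v hv hge
    exact pv_mem_dropWhile_of_ge vs t v hv (le_of_lt (lt_of_lt_of_le htt hge))
  have hsub : (vs.dropWhile (fun v => decide (v < t))).Sublist vs := List.dropWhile_sublist _
  have hiff : t' ∈ vs.dropWhile (fun v => decide (v < t)) ↔ t' ∈ vs :=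
    ⟨fun hx => hsub.mem hx, fun hx => hmem t' hx (le_refl t')⟩
  have hc : (vs.dropWhile (fun v => decide (v < t))).contains t' = vs.contains t' := by
    rw [List.contains_eq_mem, List.contains_eq_mem]
    exact decide_eq_decide.mpr hiff
  have ha : (vs.dropWhile (fun v => decide (v < t))).any (fun v => PySem.Str.startswith v t')
      = vs.any (fun v => PySem.Str.startswith v t') := by
    rw [Bool.eq_iff_iff, List.any_eq_true, List.any_eq_true]
    constructor
    · intro ⟨x, hx, he⟩; exact ⟨x, hsub.mem hx, he⟩
    · intro ⟨x, hx, he⟩; exact ⟨x, hmem x hx (pv_startswith_le t' x he), he⟩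
  rw [hc, ha]

-- the merge recursion sums pvC over a strictly sorted form list against a sorted variety list
theorem pv_merge_eq_sum : ∀ (fs vs : List String), fs.Pairwise (· < ·) → vs.Pairwise (· ≤ ·) →
    pvMergeScore fs vs = (fs.map (pvC vs)).sum := by
  intro fs
  induction fs with
  | nil => intro vs _ _; rfl
  | cons t rest ih =>
    intro vs hfs hvs
    have hrest : rest.Pairwise (· < ·) := (List.pairwise_cons.mp hfs).2
    have hgt : ∀ t' ∈ rest, t < t' := (List.pairwise_cons.mp hfs).1
    have hws : (vs.dropWhile (fun v => decide (v < t))).Pairwise (· ≤ ·) :=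
      hvs.sublist (List.dropWhile_sublist _)
    rw [show pvMergeScore (t :: rest) vs
          = (match vs.dropWhile (fun v => decide (v < t)) with
             | [] => (0 : Int)
             | w :: _ => if w = t then 4 else if PySem.Str.startswith w t then 1 else 0)
            + pvMergeScore rest (vs.dropWhile (fun v => decide (v < t))) from rfl]
    rw [ih _ hrest hws, List.map_cons, List.sum_cons, pv_headcheck_eq_c vs t hvs]
    congr 1
    exact congrArg List.sum
      (List.map_congr_left (fun t' ht' => pv_c_dropWhile vs t t' (hgt t' ht')))

-- every element of a set built from the nonempty-filtered list is nonempty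
theorem pv_formset_nonempty (l : List String) :
    ∀ t ∈ PySem.Set.ofList (l.filter (fun t => !t.isEmpty)), t.isEmpty = false := by
  intro t ht
  rw [PySem.Set.mem_ofList] at ht
  simpa using (List.mem_filter.mp ht).2

-- ===== VERDICT (by name: the statement is the Claim_ definition above) =====
theorem score_variety_tokens_py_spec : Claim_equal_score_variety_tokens_py := by
  intro form_tokens variety_tokens _
  unfold Spec_score_variety_tokens_py score_variety_tokens_py score_variety_tokens_py_alt
  set fS := PySem.Set.ofList ((form_tokens.map pvNorm).filter (fun t => !t.isEmpty)) with hfS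
  set vS := PySem.Set.ofList ((variety_tokens.map pvNorm).filter (fun t => !t.isEmpty)) with hvS
  by_cases h1 : (PySem.Set.contains fS "male" && PySem.Set.contains vS "female") = true
  · rw [if_pos h1, if_pos h1]
  · rw [if_neg h1, if_neg h1]
    by_cases h2 : (PySem.Set.contains fS "female" && PySem.Set.contains vS "male") = true
    · rw [if_pos h2, if_pos h2]
    · rw [if_neg h2, if_neg h2]
      simp only [PySem.Set.contains]
      rw [← hfS, ← hvS]
      have hne : ∀ t ∈ fS, t.isEmpty = false := by
        rw [hfS]; exact pv_formset_nonempty _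
      have hpf : (PySem.List.sorted fS (fun x => x) false).Pairwise (· < ·) := by
        rw [hfS]; exact PySem.List.sorted_ofList_pairwise_lt _
      have hpv : (PySem.List.sorted vS (fun x => x) false).Pairwise (· ≤ ·) :=
        PySem.List.sorted_pairwise vS (fun x => x)
      have hpermF : (PySem.List.sorted fS (fun x => x) false).Perm fS :=
        PySem.List.sorted_perm fS (fun x => x) false
      have hpermV : (PySem.List.sorted vS (fun x => x) false).Perm vS :=
        PySem.List.sorted_perm vS (fun x => x) false
      refine (pv_fold_eq_sum vS fS 0 hne).trans ?_
      rw [pv_merge_eq_sum _ _ hpf hpv]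
      rw [List.map_congr_left (fun t _ => pv_c_perm _ _ hpermV t)]
      rw [(hpermF.map (pvC vS)).sum_eq, zero_add]
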